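-- pv_equiv track=rewrite | github.com/LatencyTDH/coding-competitions | indent_parens.py | indent_string
-- ===== SOURCE A (Python) =====
-- from typing import List
--
-- def flush_word_to_storage(word: List[str], level: int, indented: List[str]):
--     if word:
--         padding = level * '\t'
--         line = padding + "".join(word)
--         if line:
--             indented.append(line)
--         word.clear()
--
-- def indent_string(input_str: str) -> str:
--     indented = []
--     level = 0
--     word = []
--
--     for ch in input_str:
--         if ch == '(':
--             flush_word_to_storage(word, level, indented)
--             indented.append(level * '\t' + '(')
--             level += 1
--         elif ch == ')':
--             flush_word_to_storage(word, level, indented)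
--             level -= 1
--             if level < 0:
--                 raise ValueError("Input string cannot have unbalanced parentheses!")
--             indented.append(level * '\t' + ')')
--         elif ch == ' ':
--             flush_word_to_storage(word, level, indented)
--         else:
--             word.append(ch)
--
--     if level != 0:
--         raise ValueError("The input string does not have balanced parentheses!")
--
--     return "\n".join(indented)
-- ===== SOURCE B (Python) =====
-- def indent_string(input_str: str) -> str:
--     # Phase 1: cut the input into tokens at delimiter positions: each '(' or ')'
--     # is its own token, and the slice since the previous delimiter (if nonempty)
--     # becomes a word token.
--     tokens = []
--     start = 0
--     for i, ch in enumerate(input_str):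
--         if ch == '(' or ch == ')':
--             if start < i:
--                 tokens.append(input_str[start:i])
--             tokens.append(ch)
--             start = i + 1
--         elif ch == ' ':
--             if start < i:
--                 tokens.append(input_str[start:i])
--             start = i + 1
--     # Phase 2: render each token at its nesting level.
--     out = []
--     level = 0
--     for t in tokens:
--         if t == '(':
--             out.append(level * '\t' + '(')
--             level += 1
--         elif t == ')':
--             level -= 1
--             if level < 0:
--                 raise ValueError("Input string cannot have unbalanced parentheses!")
--             out.append(level * '\t' + ')')
--         else:
--             out.append(level * '\t' + t)
--     if level != 0:
--         raise ValueError("The input string does not have balanced parentheses!")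
--     return '\n'.join(out)
-- ===== Notes on version B (the rewrite author's own statement) =====
-- stated objective: alternative
-- what changed: B replaces A's single char-by-char pass with a mutable flush-on-demand word accumulator by a two-phase structure: cut the input into '(' / ')' / word-slice tokens at delimiter positions (tracking slice start indices instead of accumulating characters), then render each token at the running nesting level.
import Mathlib
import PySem

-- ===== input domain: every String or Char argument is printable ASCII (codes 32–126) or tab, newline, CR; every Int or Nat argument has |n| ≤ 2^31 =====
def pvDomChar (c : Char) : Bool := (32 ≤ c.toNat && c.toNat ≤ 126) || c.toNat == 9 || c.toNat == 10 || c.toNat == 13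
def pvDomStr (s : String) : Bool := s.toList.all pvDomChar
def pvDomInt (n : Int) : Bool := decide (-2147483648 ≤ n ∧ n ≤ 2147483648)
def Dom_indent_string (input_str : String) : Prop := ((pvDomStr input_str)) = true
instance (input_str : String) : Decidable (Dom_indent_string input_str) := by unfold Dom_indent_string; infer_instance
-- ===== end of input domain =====

-- B replaces A's char-by-char flush-accumulator pass with a two-phase structure:
-- cut the input into tokens at delimiter positions (slice indices, no accumulator),
-- then render each token at the running nesting level (objective: alternative).

-- ===== PORT A =====
-- lines are kept as List Char; none = ValueError

def pvFlushA (word : List Char) (level : Int) (indented : List (List Char)) :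
    List (List Char) × List Char :=
  if word ≠ [] then
    let line := List.replicate level.toNat '\t' ++ word
    (if line ≠ [] then indented ++ [line] else indented, [])
  else (indented, word)

def pvLoopA : List Char → Int → List Char → List (List Char) → Option (List (List Char))
  | [], level, _word, indented => if level ≠ 0 then none else some indented
  | c :: cs, level, word, indented =>
    if c = '(' then
      let p := pvFlushA word level indented
      pvLoopA cs (level + 1) p.2 (p.1 ++ [List.replicate level.toNat '\t' ++ ['(']])
    else if c = ')' then
      let p := pvFlushA word level indented
      if level - 1 < 0 then none
      else pvLoopA cs (level - 1) p.2 (p.1 ++ [List.replicate (level - 1).toNat '\t' ++ [')']])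
    else if c = ' ' then
      let p := pvFlushA word level indented
      pvLoopA cs level p.2 p.1
    else pvLoopA cs level (word ++ [c]) indented

def indent_string (input_str : String) : String :=
  match pvLoopA input_str.toList 0 [] [] with
  | some lines => String.ofList (PySem.Chars.join ['\n'] lines)
  | none => ""   -- unreachable under Pre_: the Python raises ValueError there

-- ===== PORT B =====
-- phase 1: the loop 'for i, ch in enumerate(input_str)' with slice-start index;
-- the slice input_str[start:i] (0 ≤ start ≤ i) is exactly (s.take i).drop start
def pvTokB (s : List Char) : List Char → Nat → Nat → List (List Char)
  | [], _i, _start => []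
  | c :: rest, i, start =>
    if c = '(' ∨ c = ')' then
      (if start < i then [(s.take i).drop start] else []) ++ ([c] :: pvTokB s rest (i + 1) (i + 1))
    else if c = ' ' then
      (if start < i then [(s.take i).drop start] else []) ++ pvTokB s rest (i + 1) (i + 1)
    else pvTokB s rest (i + 1) start

-- phase 2: the render loop over the token list
def pvRender : List (List Char) → Int → List (List Char) → Option (List (List Char))
  | [], level, out => if level ≠ 0 then none else some out
  | t :: ts, level, out =>
    if t = ['('] then pvRender ts (level + 1) (out ++ [List.replicate level.toNat '\t' ++ t])
    else if t = [')'] then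
      if level - 1 < 0 then none
      else pvRender ts (level - 1) (out ++ [List.replicate (level - 1).toNat '\t' ++ t])
    else pvRender ts level (out ++ [List.replicate level.toNat '\t' ++ t])

def indent_string_alt (input_str : String) : String :=
  match pvRender (pvTokB input_str.toList input_str.toList 0 0) 0 [] with
  | some lines => String.ofList (PySem.Chars.join ['\n'] lines)
  | none => ""   -- unreachable under Pre_: the Python raises ValueError there

-- ===== PRECONDITION & SPEC =====
-- Pre_ = exactly the inputs where the Pythons return: balanced parentheses (every prefix has
-- at least as many opening as closing, and the totals are equal); elsewhere both raise ValueError.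
def Pre_indent_string (input_str : String) : Prop :=
  input_str.toList.count '(' = input_str.toList.count ')' ∧
  ∀ p ∈ input_str.toList.inits, p.count ')' ≤ p.count '('
instance (input_str : String) : Decidable (Pre_indent_string input_str) := by
  unfold Pre_indent_string; infer_instance

def pvWitness_indent_string : String := "(a b)"

def Spec_indent_string (input_str : String) (out : String) : Prop :=
  out = indent_string_alt input_str
instance (input_str : String) (out : String) : Decidable (Spec_indent_string input_str out) := by
  unfold Spec_indent_string; infer_instance

-- ===== CLAIM (what is proved, stated in full; the proofs are below) =====
def Claim_equal_indent_string : Prop := ∀ (input_str : String), Dom_indent_string input_str → Pre_indent_string input_str → Spec_indent_string input_str (indent_string input_str)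

-- ===== LEMMAS AND PROOFS =====

def pvWC (c : Char) : Bool := !(c == '(' || c == ')' || c == ' ')

theorem pvWC_char (c : Char) (h : pvWC c = true) : ¬ c = '(' ∧ ¬ c = ')' ∧ ¬ c = ' ' := by
  simp [pvWC] at h; tauto

-- proof-level tokenizer: the word-run form of B's phase 1 (no indices), used as a bridge
def pvTok : List Char → List (List Char)
  | [] => []
  | c :: cs =>
    if c = '(' ∨ c = ')' then [c] :: pvTok cs
    else if c = ' ' then pvTok cs
    else if (c :: cs).dropWhile pvWC = [] then []
    else ((c :: cs).takeWhile pvWC) :: pvTok ((c :: cs).dropWhile pvWC)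
termination_by l => l.length
decreasing_by
  · simp
  · simp
  · have h1 : pvWC c = true := by simp [pvWC]; tauto
    simp [h1]
    have := List.length_dropWhile_le pvWC cs
    omega

-- pending word chars are absorbed into the input
theorem pvLoopA_absorb (w2 : List Char) : ∀ (w1 cs : List Char) (level : Int)
    (ind : List (List Char)), (∀ c ∈ w2, pvWC c = true) →
    pvLoopA (w2 ++ cs) level w1 ind = pvLoopA cs level (w1 ++ w2) ind := by
  induction w2 with
  | nil => intro w1 cs level ind _; simp
  | cons c w2 ih =>
    intro w1 cs level ind h
    obtain ⟨h1, h2, h3⟩ := pvWC_char c (h c (by simp))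
    simp only [List.cons_append, pvLoopA, if_neg h1, if_neg h2, if_neg h3]
    rw [ih (w1 ++ [c]) cs level ind (fun x hx => h x (by simp [hx]))]
    simp

theorem pvWC_head_dropWhile : ∀ (l r' : List Char) (r0 : Char),
    l.dropWhile pvWC = r0 :: r' → pvWC r0 = false := by
  intro l
  induction l with
  | nil => intro r' r0 h; simp at h
  | cons a l ih =>
    intro r' r0 h
    by_cases ha : pvWC a = true
    · rw [List.dropWhile_cons_of_pos ha] at h; exact ih r' r0 h
    · rw [List.dropWhile_cons_of_neg ha] at h
      cases h; simpa using ha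

-- the core equivalence: A's loop agrees with tokenize(word-run form)+render, on every input
theorem pvMain : ∀ (n : Nat) (cs : List Char), cs.length ≤ n →
    ∀ (level : Int) (ind : List (List Char)),
    pvLoopA cs level [] ind = pvRender (pvTok cs) level ind := by
  intro n
  induction n with
  | zero =>
    intro cs hlen level ind
    have : cs = [] := by cases cs <;> simp_all
    subst this
    simp [pvLoopA, pvTok, pvRender]
  | succ n ih =>
    intro cs hlen level ind
    cases cs with
    | nil => simp [pvLoopA, pvTok, pvRender]
    | cons c cs =>
      have hlen' : cs.length ≤ n := by simpa using hlen
      by_cases h1 : c = '('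
      · subst h1
        rw [pvTok]
        simp [pvLoopA, pvFlushA, pvRender]
        exact ih cs hlen' (level + 1) _
      · by_cases h2 : c = ')'
        · subst h2
          rw [pvTok]
          simp [pvLoopA, pvFlushA, pvRender]
          split_ifs with hl
          · rfl
          · exact ih cs hlen' (level - 1) _
        · by_cases h3 : c = ' '
          · subst h3
            rw [pvTok]
            simp [pvLoopA, pvFlushA]
            exact ih cs hlen' level ind
          · -- word character
            have hc : pvWC c = true := by simp [pvWC]; tauto
            -- unfold one loop step: c goes into the pending word
            have stepL : pvLoopA (c :: cs) level [] ind = pvLoopA cs level [c] ind := by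
              simp only [pvLoopA, if_neg h1, if_neg h2, if_neg h3]; rfl
            -- split cs into its word run and the rest
            have hsplit : cs.takeWhile pvWC ++ cs.dropWhile pvWC = cs :=
              List.takeWhile_append_dropWhile
            set w := cs.takeWhile pvWC with hw
            set r := cs.dropWhile pvWC with hr
            have hdrop : (c :: cs).dropWhile pvWC = r := by
              rw [List.dropWhile_cons_of_pos hc, ← hr]
            have habsorb : pvLoopA cs level [c] ind = pvLoopA r level (c :: w) ind := by
              conv_lhs => rw [← hsplit]
              rw [pvLoopA_absorb w [c] r level ind (fun x hx => List.mem_takeWhile_imp hx)]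
              simp only [List.singleton_append]
            rw [stepL, habsorb]
            by_cases hre : r = []
            · -- the word runs to the end of the input: A never flushes it, B emits no token
              have stepT : pvTok (c :: cs) = [] := by
                rw [pvTok]
                simp only [if_neg (by tauto : ¬ (c = '(' ∨ c = ')')), if_neg h3, hdrop,
                  if_pos hre]
              rw [stepT, hre]
              simp [pvLoopA, pvRender]
            · obtain ⟨r0, r', hrr⟩ := List.exists_cons_of_ne_nil hre
              have hr0 : pvWC r0 = false := pvWC_head_dropWhile cs r' r0 (by rw [← hr, hrr])
              -- tokenizer step
              have stepT : pvTok (c :: cs) = (c :: w) :: pvTok r := by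
                rw [pvTok]
                simp only [if_neg (by tauto : ¬ (c = '(' ∨ c = ')')), if_neg h3, hdrop,
                  if_neg hre]
                rw [List.takeWhile_cons_of_pos hc, ← hw]
              have htok_ne_l : ¬ (c :: w) = ['('] := by
                intro e; injection e with e1 _; simp [e1, pvWC] at hc
              have htok_ne_r : ¬ (c :: w) = [')'] := by
                intro e; injection e with e1 _; simp [e1, pvWC] at hc
              -- render step for the word token
              have stepR : pvRender (pvTok (c :: cs)) level ind =
                  pvRender (pvTok r) level (ind ++ [List.replicate level.toNat '\t' ++ (c :: w)]) := by
                rw [stepT, pvRender]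
                simp only [if_neg htok_ne_l, if_neg htok_ne_r]
              rw [stepR, hrr]
              -- now both sides flush the word (c :: w) at the special char r0
              have hlen_r' : r'.length ≤ n := by
                have s1 : r0 :: r' <:+ cs := by rw [← hrr, hr]; exact List.dropWhile_suffix pvWC
                have := s1.length_le
                simp at this; omega
              by_cases hp1 : r0 = '('
              · subst hp1
                rw [pvTok]
                simp [pvLoopA, pvFlushA, pvRender]
                exact ih r' hlen_r' (level + 1) _
              · by_cases hp2 : r0 = ')'
                · subst hp2
                  rw [pvTok]
                  simp [pvLoopA, pvFlushA, pvRender]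
                  split_ifs with hl
                  · rfl
                  · exact ih r' hlen_r' (level - 1) _
                · have hp3 : r0 = ' ' := by
                    simp [pvWC] at hr0; tauto
                  subst hp3
                  rw [pvTok]
                  simp [pvLoopA, pvFlushA]
                  exact ih r' hlen_r' level _

-- takeWhile/dropWhile across an all-word prefix followed by a delimiter
theorem pvRun_split : ∀ (p t : List Char) (t0 : Char), (∀ x ∈ p, pvWC x = true) →
    pvWC t0 = false →
    (p ++ t0 :: t).takeWhile pvWC = p ∧ (p ++ t0 :: t).dropWhile pvWC = t0 :: t := by
  intro p
  induction p with
  | nil =>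
    intro t t0 _ h0
    have hneg : ¬ pvWC t0 = true := by rw [h0]; simp
    exact ⟨by rw [List.nil_append, List.takeWhile_cons_of_neg hneg],
      by rw [List.nil_append, List.dropWhile_cons_of_neg hneg]⟩
  | cons a p ih =>
    intro t t0 hp h0
    have ha : pvWC a = true := hp a (by simp)
    obtain ⟨ih1, ih2⟩ := ih t t0 (fun x hx => hp x (by simp [hx])) h0
    constructor
    · rw [List.cons_append, List.takeWhile_cons_of_pos ha, ih1]
    · rw [List.cons_append, List.dropWhile_cons_of_pos ha, ih2]

-- an all-word-character list produces no token (no delimiter ever cuts it)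
theorem pvTok_all_wc : ∀ (p : List Char), (∀ x ∈ p, pvWC x = true) → pvTok p = [] := by
  intro p hp
  cases p with
  | nil => rw [pvTok]
  | cons a p =>
    have ha : pvWC a = true := hp a (by simp)
    obtain ⟨h1, h2, h3⟩ := pvWC_char a ha
    have hd : (a :: p).dropWhile pvWC = [] := by
      rw [List.dropWhile_eq_nil_iff]; exact hp
    rw [pvTok]
    simp only [if_neg (by tauto : ¬ (a = '(' ∨ a = ')')), if_neg h3, hd]
    simp

-- a pending all-word run followed by a delimiter tokenizes to the run then the rest
theorem pvTok_wc_append (p t : List Char) (t0 : Char) (hp : ∀ x ∈ p, pvWC x = true)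
    (h0 : pvWC t0 = false) :
    pvTok (p ++ t0 :: t) = (if p = [] then [] else [p]) ++ pvTok (t0 :: t) := by
  cases p with
  | nil => simp
  | cons a p =>
    have ha : pvWC a = true := hp a (by simp)
    obtain ⟨h1, h2, h3⟩ := pvWC_char a ha
    obtain ⟨hT, hD⟩ := pvRun_split (a :: p) t t0 hp h0
    rw [List.cons_append, pvTok]
    simp only [← List.cons_append, hT, hD, if_neg (by tauto : ¬ (a = '(' ∨ a = ')')),
      if_neg h3, if_neg (by simp : ¬ (t0 :: t) = ([] : List Char))]
    simp

-- B's index/slice tokenizer equals the word-run tokenizer, given the loop invariant: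
-- rest = s[i:], the pending slice s[start:i] is all word characters, start ≤ i
theorem pvTokB_bridge : ∀ (rest s : List Char) (i start : Nat), start ≤ i →
    s.drop i = rest → (∀ x ∈ (s.take i).drop start, pvWC x = true) →
    pvTokB s rest i start = pvTok ((s.take i).drop start ++ rest) := by
  intro rest
  induction rest with
  | nil =>
    intro s i start _ _ hp
    rw [pvTokB]
    rw [List.append_nil, pvTok_all_wc _ hp]
  | cons c rest ih =>
    intro s i start hsi hdrop hp
    have hi : i < s.length := by
      by_contra h
      rw [List.drop_eq_nil_of_le (by omega)] at hdrop
      exact absurd hdrop (by simp)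
    have hget : s[i]? = some c := by
      have : (s.drop i)[0]? = s[i + 0]? := List.getElem?_drop
      rw [hdrop] at this
      simpa using this.symm
    have htake : s.take (i + 1) = s.take i ++ [c] := by
      rw [List.take_add_one, hget]; rfl
    have hdrop' : s.drop (i + 1) = rest := by
      have : s.drop (i + 1) = (s.drop i).drop 1 := by
        rw [List.drop_drop]
      rw [this, hdrop]; rfl
    have hlen_take : (s.take i).length = i := by
      rw [List.length_take]; omega
    have hpend_len : ((s.take i).drop start).length = i - start := by
      rw [List.length_drop, hlen_take]
    have hnil_iff : ((s.take i).drop start = []) ↔ ¬ start < i := by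
      rw [← List.length_eq_zero_iff, hpend_len]; omega
    have hnew_pend : (s.take (i + 1)).drop (i + 1) = [] := by
      apply List.drop_eq_nil_of_le
      rw [List.length_take]; omega
    by_cases hdel : c = '(' ∨ c = ')'
    · have h0 : pvWC c = false := by
        rcases hdel with h | h <;> subst h <;> rfl
      rw [pvTokB]
      simp only [if_pos hdel]
      rw [ih s (i + 1) (i + 1) le_rfl hdrop' (by rw [hnew_pend]; simp),
        hnew_pend, List.nil_append,
        pvTok_wc_append _ rest c hp h0, pvTok]
      simp only [if_pos hdel]
      by_cases hlt : start < i
      · rw [if_pos hlt, if_neg (by rw [hnil_iff]; omega)]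
      · rw [if_neg hlt, if_pos (hnil_iff.mpr hlt)]
    · by_cases hsp : c = ' '
      · have h0 : pvWC c = false := by subst hsp; rfl
        rw [pvTokB]
        simp only [if_neg hdel, if_pos hsp]
        rw [ih s (i + 1) (i + 1) le_rfl hdrop' (by rw [hnew_pend]; simp),
          hnew_pend, List.nil_append,
          pvTok_wc_append _ rest c hp h0, pvTok]
        simp only [if_neg hdel, if_pos hsp]
        by_cases hlt : start < i
        · rw [if_pos hlt, if_neg (by rw [hnil_iff]; omega)]
        · rw [if_neg hlt, if_pos (hnil_iff.mpr hlt)]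
      · have hc : pvWC c = true := by
          simp only [pvWC, Bool.not_eq_true', Bool.or_eq_false_iff, beq_eq_false_iff_ne]
          exact ⟨⟨fun h => hdel (Or.inl h), fun h => hdel (Or.inr h)⟩, hsp⟩
        have hp' : ∀ x ∈ (s.take (i + 1)).drop start, pvWC x = true := by
          rw [htake, List.drop_append_of_le_length (by omega)]
          intro x hx
          rcases List.mem_append.mp hx with h | h
          · exact hp x h
          · simp at h; subst h; exact hc
        rw [pvTokB]
        simp only [if_neg hdel, if_neg hsp]
        rw [ih s (i + 1) start (by omega) hdrop' hp']
        congr 1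
        rw [htake, List.drop_append_of_le_length (by omega)]
        simp

theorem pvTokB_eq_pvTok (s : List Char) : pvTokB s s 0 0 = pvTok s := by
  have := pvTokB_bridge s s 0 0 le_rfl (by simp) (by simp)
  simpa using this

-- ===== VERDICT (by name: the statement is the Claim_ definition above) =====
theorem indent_string_spec : Claim_equal_indent_string := by
  intro s _ _
  unfold Spec_indent_string indent_string indent_string_alt
  rw [pvTokB_eq_pvTok, pvMain s.toList.length s.toList le_rfl 0 []]
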